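-- pv_equiv track=rewrite | github.com/brnunez15/AyED1-2024-TPs | TP4/ej3.py | obtener_claves
-- ===== SOURCE A (Python) =====
-- def obtener_claves(clave_maestra: str) -> tuple:
--     clave1 = ""
--     clave2 = ""
--
--     for posicion, digito in enumerate(clave_maestra):
--         if (posicion + 1) % 2 != 0:
--             clave1 += digito
--         else:
--             clave2 += digito
--
--     return clave1, clave2
-- ===== SOURCE B (Python) =====
-- def obtener_claves(clave_maestra: str) -> tuple:
--     return clave_maestra[::2], clave_maestra[1::2]
-- ===== Notes on version B (the rewrite author's own statement) =====
-- stated objective: idiomatic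
-- what changed: Replaces the enumerate loop with parity branch and repeated string concatenation by two stride slices s[::2] and s[1::2] returned directly.
import Mathlib
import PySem

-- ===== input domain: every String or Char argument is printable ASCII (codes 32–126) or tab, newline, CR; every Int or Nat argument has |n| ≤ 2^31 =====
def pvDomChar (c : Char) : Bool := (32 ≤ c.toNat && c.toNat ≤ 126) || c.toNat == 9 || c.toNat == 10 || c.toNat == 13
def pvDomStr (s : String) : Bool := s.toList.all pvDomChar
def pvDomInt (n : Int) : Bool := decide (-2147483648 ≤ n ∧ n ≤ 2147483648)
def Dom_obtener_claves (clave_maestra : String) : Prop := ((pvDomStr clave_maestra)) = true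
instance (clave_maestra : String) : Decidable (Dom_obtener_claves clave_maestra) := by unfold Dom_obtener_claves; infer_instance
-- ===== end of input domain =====

-- B returns the two stride slices s[::2] and s[1::2] instead of accumulating through an enumerate loop with a parity branch.

-- ===== PORT A =====
-- the loop body: clave1/clave2 as Char lists (Python string +=), built in order
def obtener_claves_step (acc : List Char × List Char) (pd : Int × Char) : List Char × List Char :=
  if PySem.Int.mod (pd.1 + 1) 2 ≠ 0 then (acc.1 ++ [pd.2], acc.2) else (acc.1, acc.2 ++ [pd.2])

def obtener_claves (clave_maestra : String) : String × String :=
  let r := (PySem.List.enumerate clave_maestra.toList 0).foldl obtener_claves_step ([], [])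
  (String.ofList r.1, String.ofList r.2)

-- ===== PORT B =====
def obtener_claves_alt (clave_maestra : String) : String × String :=
  ((PySem.Str.slice? clave_maestra none none 2).getD "",
   (PySem.Str.slice? clave_maestra (some 1) none 2).getD "")

-- ===== PRECONDITION & SPEC =====
def Spec_obtener_claves (clave_maestra : String) (out : String × String) : Prop := out = obtener_claves_alt clave_maestra
instance (clave_maestra : String) (out : String × String) : Decidable (Spec_obtener_claves clave_maestra out) := by unfold Spec_obtener_claves; infer_instance

-- ===== CLAIM (what is proved, stated in full; the proofs are below) =====
def Claim_equal_obtener_claves : Prop := ∀ (clave_maestra : String), Dom_obtener_claves clave_maestra → Spec_obtener_claves clave_maestra (obtener_claves clave_maestra)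

-- ===== LEMMAS AND PROOFS =====

-- characters at even 0-based indices
def pvEvens {α : Type} : List α → List α
  | [] => []
  | [a] => [a]
  | a :: _ :: l => a :: pvEvens l

-- characters at odd 0-based indices
def pvOdds {α : Type} : List α → List α
  | [] => []
  | _ :: l => pvEvens l

lemma loop_evens_odds {α : Type} (cs : List α) : ∀ (i : Int) (c1 c2 : List α), i % 2 = 0 →
    (PySem.List.enumerate (α := α) cs i).foldl
      (fun acc pd => if PySem.Int.mod (pd.1 + 1) 2 ≠ 0 then (acc.1 ++ [pd.2], acc.2) else (acc.1, acc.2 ++ [pd.2]))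
      (c1, c2)
      = (c1 ++ pvEvens cs, c2 ++ pvOdds cs) := by
  induction cs using pvEvens.induct with
  | case1 => simp [PySem.List.enumerate, pvEvens, pvOdds]
  | case2 a =>
    intro i c1 c2 hi
    have h1 : (i + 1) % 2 = 1 := by omega
    have s1 : (fun (acc : List α × List α) (pd : Int × α) => if PySem.Int.mod (pd.1 + 1) 2 ≠ 0 then (acc.1 ++ [pd.2], acc.2) else (acc.1, acc.2 ++ [pd.2])) (c1, c2) (i, a) = (c1 ++ [a], c2) := by simp [h1]
    simp only [PySem.List.enumerate, List.foldl_cons, List.foldl_nil, s1]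
    simp [pvEvens, pvOdds]
  | case3 a b l ih =>
    intro i c1 c2 hi
    have h1 : (i + 1) % 2 = 1 := by omega
    have h2 : (2 : Int) ∣ (i + 1 + 1) := by omega
    have s1 : (fun (acc : List α × List α) (pd : Int × α) => if PySem.Int.mod (pd.1 + 1) 2 ≠ 0 then (acc.1 ++ [pd.2], acc.2) else (acc.1, acc.2 ++ [pd.2])) (c1, c2) (i, a) = (c1 ++ [a], c2) := by simp [h1]
    have s2 : (fun (acc : List α × List α) (pd : Int × α) => if PySem.Int.mod (pd.1 + 1) 2 ≠ 0 then (acc.1 ++ [pd.2], acc.2) else (acc.1, acc.2 ++ [pd.2])) (c1 ++ [a], c2) (i + 1, b) = (c1 ++ [a], c2 ++ [b]) := by simp [h2]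
    simp only [PySem.List.enumerate, List.foldl_cons, s1, s2]
    rw [ih (i + 1 + 1) _ _ (by omega)]
    simp only [pvEvens, pvOdds, List.append_assoc, List.cons_append, List.nil_append]
    rw [show pvEvens (b :: l) = b :: pvOdds l from by cases l <;> rfl]
    cases l <;> rfl

lemma fm_evens {α : Type} (cs : List α) :
    (List.range ((cs.length + 1) / 2)).filterMap (fun (k : Nat) => cs[(0 + 2 * (k : Int)).toNat]?) = pvEvens cs := by
  induction cs using pvEvens.induct with
  | case1 => simp [pvEvens]
  | case2 a => simp [pvEvens]
  | case3 a b l ih =>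
    have hlen : (a :: b :: l).length = l.length + 2 := by simp
    have hcnt : ((a :: b :: l).length + 1) / 2 = ((l.length + 1) / 2) + 1 := by omega
    rw [hcnt, List.range_succ_eq_map, List.filterMap_cons, List.filterMap_map]
    have h0 : (a :: b :: l)[(0 + 2 * ((0 : Nat) : Int)).toNat]? = some a := by norm_num
    rw [h0]
    have hshift : ∀ k : Nat,
        ((fun k => (a :: b :: l)[(0 + 2 * ((k : Nat) : Int)).toNat]?) ∘ Nat.succ) k
          = l[(0 + 2 * ((k : Nat) : Int)).toNat]? := by
      intro k
      have : (0 + 2 * (((k + 1 : Nat)) : Int)).toNat = (0 + 2 * ((k : Nat) : Int)).toNat + 2 := by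
        push_cast; omega
      simp only [Function.comp, Nat.succ_eq_add_one, this]
      rfl
    rw [List.filterMap_congr (by intro k _; exact hshift k)]
    rw [ih]
    simp [pvEvens]

lemma fm_odds {α : Type} (cs : List α) :
    (List.range (cs.length / 2)).filterMap (fun (k : Nat) => cs[(1 + 2 * (k : Int)).toNat]?) = pvOdds cs := by
  cases cs with
  | nil => simp [pvOdds]
  | cons a l =>
    have hcnt : (a :: l).length / 2 = (l.length + 1) / 2 := by simp
    rw [hcnt]
    have hshift : ∀ k : Nat,
        (a :: l)[(1 + 2 * ((k : Nat) : Int)).toNat]? = l[(0 + 2 * ((k : Nat) : Int)).toNat]? := by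
      intro k
      have : (1 + 2 * ((k : Nat) : Int)).toNat = (0 + 2 * ((k : Nat) : Int)).toNat + 1 := by
        omega
      rw [this]; rfl
    rw [List.filterMap_congr (by intro k _; exact hshift k)]
    exact fm_evens l ▸ rfl

lemma slice2_evens {α : Type} (cs : List α) :
    PySem.List.slice? cs none none 2 = some (pvEvens cs) := by
  rw [show PySem.List.slice? cs none none 2
      = some ((List.range (if (0:Int) < 2 then if (0:Int) < (cs.length:Int) then (((cs.length:Int) - 0 + 2 - 1) / 2).toNat else 0 else if (cs.length:Int) < 0 then ((0 - (cs.length:Int) + -2 - 1) / -2).toNat else 0)).filterMap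
          (fun (k : Nat) => cs[((0:Int) + 2 * (k:Int)).toNat]?)) from rfl]
  congr 1
  have : (if (0:Int) < 2 then if (0:Int) < (cs.length:Int) then (((cs.length:Int) - 0 + 2 - 1) / 2).toNat else 0 else if (cs.length:Int) < 0 then ((0 - (cs.length:Int) + -2 - 1) / -2).toNat else 0) = (cs.length + 1) / 2 := by
    split_ifs with h1 h2 <;> omega
  rw [this, fm_evens]

lemma slice12_odds {α : Type} (cs : List α) :
    PySem.List.slice? cs (some 1) none 2 = some (pvOdds cs) := by
  cases cs with
  | nil => rfl
  | cons a l =>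
    simp only [PySem.List.slice?, PySem.List.sliceIndices]
    norm_num
    have hc : (if 0 < l.length then (((l.length : Int) + 2 - 1) / 2).toNat else 0) = (a :: l).length / 2 := by
      split_ifs with h <;> simp <;> omega
    rw [hc]
    exact fm_odds (a :: l)

theorem obtener_claves_spec : Claim_equal_obtener_claves := by
  intro s _
  unfold Spec_obtener_claves obtener_claves obtener_claves_alt obtener_claves_step
  rw [loop_evens_odds s.toList 0 [] [] rfl]
  simp [PySem.Str.slice?, slice2_evens, slice12_odds, PySem.Chars.slice?]
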